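-- pv_equiv track=rewrite | github.com/DaveUgalde/AnalyzerBrain | src/api/authentication.py | _has_required_roles
-- ===== SOURCE A (Python) =====
-- from typing import Dict, List, Optional, Any, Tuple, Union
-- from enum import Enum
--
-- class UserRole(str, Enum):
--     """Roles de usuario."""
--     ADMIN = "admin"
--     DEVELOPER = "developer"
--     VIEWER = "viewer"
--     SYSTEM = "system"
--     GUEST = "guest"
--
-- def _has_required_roles(user_roles: List[UserRole], required_scopes: List[str]) -> bool:
--     """Verifica si el usuario tiene los roles necesarios."""
--     if not required_scopes:
--         return True
--
--     # Mapear scopes a roles (esto podría ser configurable)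
--     scope_to_role = {
--         "admin": [UserRole.ADMIN],
--         "write": [UserRole.ADMIN, UserRole.DEVELOPER],
--         "read": [UserRole.ADMIN, UserRole.DEVELOPER, UserRole.VIEWER],
--         "analyze": [UserRole.ADMIN, UserRole.DEVELOPER],
--         "system": [UserRole.ADMIN, UserRole.SYSTEM]
--     }
--
--     for scope in required_scopes:
--         allowed_roles = scope_to_role.get(scope, [])
--         if not any(role in allowed_roles for role in user_roles):
--             return False
--
--     return True
-- ===== SOURCE B (Python) =====
-- def _has_required_roles(user_roles, required_scopes):
--     """Verifica si el usuario tiene los roles necesarios."""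
--     if not required_scopes:
--         return True
--
--     # Inverted mapping: role -> scopes it grants
--     role_to_scopes = {
--         "admin": {"admin", "write", "read", "analyze", "system"},
--         "developer": {"write", "read", "analyze"},
--         "viewer": {"read"},
--         "system": {"system"},
--     }
--
--     granted = set()
--     for role in user_roles:
--         granted |= role_to_scopes.get(role, set())
--
--     return set(required_scopes) <= granted
-- ===== Notes on version B (the rewrite author's own statement) =====
-- stated objective: alternative
-- what changed: Replaces the per-scope any-over-roles nested scan with an inverted role->scopes index: one pass over user_roles builds the granted-scopes set, then a single subset test decides the result.
import Mathlib
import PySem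

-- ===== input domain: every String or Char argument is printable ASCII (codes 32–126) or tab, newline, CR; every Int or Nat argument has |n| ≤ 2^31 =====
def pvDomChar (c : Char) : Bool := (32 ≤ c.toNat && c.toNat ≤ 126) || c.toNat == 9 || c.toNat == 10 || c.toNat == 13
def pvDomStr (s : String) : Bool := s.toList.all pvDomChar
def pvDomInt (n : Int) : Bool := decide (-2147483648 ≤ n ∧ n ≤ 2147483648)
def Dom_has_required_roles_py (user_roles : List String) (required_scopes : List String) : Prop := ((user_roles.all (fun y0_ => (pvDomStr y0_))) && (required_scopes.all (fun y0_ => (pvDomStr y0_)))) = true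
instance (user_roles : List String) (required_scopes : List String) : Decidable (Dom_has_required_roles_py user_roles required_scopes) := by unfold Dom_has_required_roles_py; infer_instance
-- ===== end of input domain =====

-- B replaces A's nested scope×role scan with an inverted role→scopes index:
-- one pass over user_roles accumulates the granted-scope set, then one subset test (objective: alternative).

-- ===== PORT A =====
-- the scope -> allowed-roles dict of A (UserRole is a str Enum, so roles compare as their strings)
def scopeToRoleDict : PySem.Dict String (List String) :=
  PySem.Dict.ofList [("admin", ["admin"]),
   ("write", ["admin", "developer"]),
   ("read", ["admin", "developer", "viewer"]),
   ("analyze", ["admin", "developer"]),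
   ("system", ["admin", "system"])]

-- the 'for scope in required_scopes' loop with its early 'return False'
def hrrScopeLoop (user_roles : List String) : List String → Bool
  | [] => true
  | scope :: rest =>
      let allowed_roles := PySem.Dict.getD scopeToRoleDict scope []
      if user_roles.any (fun role => allowed_roles.contains role) then
        hrrScopeLoop user_roles rest
      else false

def has_required_roles_py (user_roles : List String) (required_scopes : List String) : Bool :=
  if required_scopes.isEmpty then true
  else hrrScopeLoop user_roles required_scopes

-- ===== PORT B =====
-- inverted mapping: role -> set of scopes it grants
def roleToScopesDict : PySem.Dict String (PySem.Set String) :=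
  PySem.Dict.ofList [("admin", PySem.Set.ofList ["admin", "write", "read", "analyze", "system"]),
   ("developer", PySem.Set.ofList ["write", "read", "analyze"]),
   ("viewer", PySem.Set.ofList ["read"]),
   ("system", PySem.Set.ofList ["system"])]

def has_required_roles_py_alt (user_roles : List String) (required_scopes : List String) : Bool :=
  if required_scopes.isEmpty then true
  else
    let granted := user_roles.foldl
      (fun g role => PySem.Set.union g (PySem.Dict.getD roleToScopesDict role PySem.Set.empty))
      PySem.Set.empty
    PySem.Set.issubset (PySem.Set.ofList required_scopes) granted

-- ===== PRECONDITION & SPEC =====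
def Spec_has_required_roles_py (user_roles : List String) (required_scopes : List String) (out : Bool) : Prop := out = has_required_roles_py_alt user_roles required_scopes
instance (user_roles : List String) (required_scopes : List String) (out : Bool) : Decidable (Spec_has_required_roles_py user_roles required_scopes out) := by unfold Spec_has_required_roles_py; infer_instance

-- ===== CLAIM (what is proved, stated in full; the proofs are below) =====
def Claim_equal_has_required_roles_py : Prop := ∀ (user_roles : List String) (required_scopes : List String), Dom_has_required_roles_py user_roles required_scopes → Spec_has_required_roles_py user_roles required_scopes (has_required_roles_py user_roles required_scopes)

-- ===== LEMMAS AND PROOFS =====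

-- closed-form value of A's dict lookup
lemma getD_scopeDict (s : String) :
    PySem.Dict.getD scopeToRoleDict s [] =
      if s = "admin" then ["admin"]
      else if s = "write" then ["admin", "developer"]
      else if s = "read" then ["admin", "developer", "viewer"]
      else if s = "analyze" then ["admin", "developer"]
      else if s = "system" then ["admin", "system"]
      else [] := by
  have h : scopeToRoleDict =
      ((((PySem.Dict.empty.insert "admin" ["admin"]).insert "write" ["admin", "developer"]).insert
          "read" ["admin", "developer", "viewer"]).insert "analyze" ["admin", "developer"]).insert
        "system" ["admin", "system"] := by decide
  rw [h]
  simp only [PySem.Dict.getD_insert, PySem.Dict.getD_empty]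
  split_ifs <;> simp_all

-- closed-form value of B's dict lookup
lemma getD_roleDict (r : String) :
    PySem.Dict.getD roleToScopesDict r PySem.Set.empty =
      if r = "admin" then ["admin", "write", "read", "analyze", "system"]
      else if r = "developer" then ["write", "read", "analyze"]
      else if r = "viewer" then ["read"]
      else if r = "system" then ["system"]
      else [] := by
  have h : roleToScopesDict =
      (((PySem.Dict.empty.insert "admin" ["admin", "write", "read", "analyze", "system"]).insert
          "developer" ["write", "read", "analyze"]).insert "viewer" ["read"]).insert
        "system" ["system"] := by decide
  rw [h]
  simp only [PySem.Dict.getD_insert, PySem.Dict.getD_empty]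
  split_ifs <;> simp_all [PySem.Set.empty]

-- the two tables encode the same scope/role relation
lemma cross_table' (s r : String) :
    r ∈ PySem.Dict.getD scopeToRoleDict s [] ↔
    s ∈ PySem.Dict.getD roleToScopesDict r PySem.Set.empty := by
  rw [getD_scopeDict, getD_roleDict]
  split_ifs <;> simp_all <;> aesop

-- membership in the folded union of granted scopes
lemma mem_granted (user_roles : List String) (g0 : PySem.Set String) (s : String) :
    s ∈ user_roles.foldl
        (fun g role => PySem.Set.union g (PySem.Dict.getD roleToScopesDict role PySem.Set.empty))
        g0 ↔
    s ∈ g0 ∨ ∃ r ∈ user_roles, s ∈ PySem.Dict.getD roleToScopesDict r PySem.Set.empty := by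
  induction user_roles generalizing g0 with
  | nil => simp
  | cons r rest ih =>
      simp only [List.foldl_cons, ih, PySem.Set.mem_union]
      constructor
      · rintro (⟨h | h⟩ | ⟨x, hx, hs⟩)
        · exact Or.inl h
        · exact Or.inr ⟨r, by simp, h⟩
        · exact Or.inr ⟨x, by simp [hx], hs⟩
      · rintro (h | ⟨x, hx, hs⟩)
        · exact Or.inl (Or.inl h)
        · rcases List.mem_cons.mp hx with rfl | hx
          · exact Or.inl (Or.inr hs)
          · exact Or.inr ⟨x, hx, hs⟩

-- A's scope loop is an 'all' over the scopes
lemma hrrScopeLoop_eq_all (user_roles scopes : List String) :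
    hrrScopeLoop user_roles scopes =
      scopes.all (fun s => user_roles.any
        (fun r => (PySem.Dict.getD scopeToRoleDict s []).contains r)) := by
  induction scopes with
  | nil => rfl
  | cons s rest ih =>
      simp only [hrrScopeLoop, ih, List.all_cons]
      cases h : user_roles.any (fun role => (PySem.Dict.getD scopeToRoleDict s []).contains role) <;>
        simp [h]

-- ===== VERDICT (by name: the statement is the Claim_ definition above) =====
theorem has_required_roles_py_spec : Claim_equal_has_required_roles_py := by
  intro user_roles required_scopes _
  unfold Spec_has_required_roles_py has_required_roles_py has_required_roles_py_alt
  split_ifs with h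
  · rfl
  · rw [hrrScopeLoop_eq_all]
    rw [Bool.eq_iff_iff]
    simp only [List.all_eq_true, List.any_eq_true, PySem.Set.issubset_iff,
      PySem.Set.mem_ofList, List.contains_eq_mem, decide_eq_true_eq]
    constructor
    · intro hall x hx
      rcases hall x hx with ⟨r, hr, hmem⟩
      rw [mem_granted]
      exact Or.inr ⟨r, hr, (cross_table' x r).mp hmem⟩
    · intro hsub x hx
      have := hsub x hx
      rw [mem_granted] at this
      rcases this with h0 | ⟨r, hr, hmem⟩
      · simp [PySem.Set.empty] at h0
      · exact ⟨r, hr, (cross_table' x r).mpr hmem⟩
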